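-- pv_equiv track=rewrite | github.com/rsprenkels/kattis | python/1_5/eenymeeny.py | eenymeeny
-- ===== SOURCE A (Python) =====
-- def eenymeeny(rhime_len, kids):
--     kids_pointer = 0
--     next_team = 0
--     teams = [[],[]]
--     while len(kids) > 0:
--         kids_pointer = (-1 + kids_pointer +  rhime_len) % len(kids)
--         teams[next_team].append(kids.pop(kids_pointer))
--         next_team = (next_team + 1) % 2
--     return tuple(teams)
-- ===== SOURCE B (Python) =====
-- def eenymeeny(rhime_len, kids):
--     # Phase 1: compute the elimination order by keeping the survivors
--     # rotated so that the counting always starts at the front.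
--     dq = list(kids)
--     order = []
--     while dq:
--         s = (rhime_len - 1) % len(dq)
--         order.append(dq[s])
--         dq = dq[s + 1:] + dq[:s]
--     # Phase 2: deal the elimination order alternately into the two teams.
--     a, b = [], []
--     second = False
--     for x in order:
--         if second:
--             b.append(x)
--         else:
--             a.append(x)
--         second = not second
--     return (a, b)
-- ===== Notes on version B (the rewrite author's own statement) =====
-- stated objective: alternative
-- what changed: A simulates the count with a moving pointer and list.pop(index) into two interleaved team lists; B keeps the survivors rotated so the count always starts at the front (one slice concatenation per elimination, no pointer), records only the elimination order, and then deals that order alternately into the two teams in a second pass.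
import Mathlib
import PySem

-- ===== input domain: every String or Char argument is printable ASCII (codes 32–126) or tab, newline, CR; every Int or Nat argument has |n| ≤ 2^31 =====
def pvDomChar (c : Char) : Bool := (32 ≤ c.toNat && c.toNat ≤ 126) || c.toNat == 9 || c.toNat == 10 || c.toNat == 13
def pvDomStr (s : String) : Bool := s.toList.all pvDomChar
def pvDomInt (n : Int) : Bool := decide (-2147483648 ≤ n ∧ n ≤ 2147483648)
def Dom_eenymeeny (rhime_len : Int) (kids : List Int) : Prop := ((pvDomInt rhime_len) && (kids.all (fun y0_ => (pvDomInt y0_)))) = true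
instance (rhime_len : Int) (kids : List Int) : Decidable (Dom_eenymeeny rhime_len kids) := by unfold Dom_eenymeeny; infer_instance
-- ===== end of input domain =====

-- B replaces A's moving pointer + list.pop simulation by a two-phase algorithm (keep the
-- survivors rotated so counting always starts at the front, then deal the elimination order
-- alternately); equivalence is about the RETURN value only — A empties its `kids` argument
-- in place, B does not mutate it.

-- ===== PORT A =====
-- while-loop of A: fuel = number of kids still in the list (each iteration pops exactly one).
-- `teams[next_team].append(…)` with next_team ∈ {0,1} is ported as the two-way branch below.
def eenymeenyGo (rhime_len : Int) : Nat → List Int → Int → Int → List Int → List Int → List Int × List Int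
  | 0, _, _, _, t0, t1 => (t0, t1)
  | fuel + 1, kids, ptr, team, t0, t1 =>
    if kids.length = 0 then (t0, t1)
    else
      match PySem.List.pop? kids (PySem.Int.mod (-1 + ptr + rhime_len) (kids.length : Int)) with
      | none => (t0, t1)   -- unreachable: the mod index is in range (totality guard only)
      | some (x, rest) =>
        if team = 0 then
          eenymeenyGo rhime_len fuel rest (PySem.Int.mod (-1 + ptr + rhime_len) (kids.length : Int))
            (PySem.Int.mod (team + 1) 2) (t0 ++ [x]) t1
        else
          eenymeenyGo rhime_len fuel rest (PySem.Int.mod (-1 + ptr + rhime_len) (kids.length : Int))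
            (PySem.Int.mod (team + 1) 2) t0 (t1 ++ [x])

def eenymeeny (rhime_len : Int) (kids : List Int) : List Int × List Int :=
  eenymeenyGo rhime_len kids.length kids 0 0 [] []

-- ===== PORT B =====
-- phase 1 of Source B: while dq: s = (rhime_len-1) % len(dq); order.append(dq[s]); dq = dq[s+1:] + dq[:s]
def eenymeenyOrder (rhime_len : Int) : Nat → List Int → List Int → List Int
  | 0, _, order => order
  | fuel + 1, dq, order =>
    if dq.length = 0 then order
    else
      match PySem.List.pyGet? dq (PySem.Int.mod (rhime_len - 1) (dq.length : Int)) with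
      | none => order   -- unreachable: the mod index is in range (totality guard only)
      | some x =>
        eenymeenyOrder rhime_len fuel
          (PySem.List.slice dq (some (PySem.Int.mod (rhime_len - 1) (dq.length : Int) + 1)) none ++
            PySem.List.slice dq none (some (PySem.Int.mod (rhime_len - 1) (dq.length : Int))))
          (order ++ [x])

-- phase 2 of Source B: deal `order` alternately into the two teams
def eenymeenySplit : List Int → Bool → List Int → List Int → List Int × List Int
  | [], _, a, b => (a, b)
  | x :: rest, second, a, b =>
    if second then eenymeenySplit rest (!second) a (b ++ [x])
    else eenymeenySplit rest (!second) (a ++ [x]) b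

def eenymeeny_alt (rhime_len : Int) (kids : List Int) : List Int × List Int :=
  eenymeenySplit (eenymeenyOrder rhime_len kids.length kids []) false [] []

-- ===== PRECONDITION & SPEC =====
def Spec_eenymeeny (rhime_len : Int) (kids : List Int) (out : List Int × List Int) : Prop := out = eenymeeny_alt rhime_len kids
instance (rhime_len : Int) (kids : List Int) (out : List Int × List Int) : Decidable (Spec_eenymeeny rhime_len kids out) := by unfold Spec_eenymeeny; infer_instance

-- ===== CLAIM (what is proved, stated in full; the proofs are below) =====
def Claim_equal_eenymeeny : Prop := ∀ (rhime_len : Int) (kids : List Int), Dom_eenymeeny rhime_len kids → Spec_eenymeeny rhime_len kids (eenymeeny rhime_len kids)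

-- ===== LEMMAS AND PROOFS =====

-- accumulator lemma for phase 1
lemma eenymeenyOrder_acc (r : Int) : ∀ (fuel : Nat) (dq acc : List Int),
    eenymeenyOrder r fuel dq acc = acc ++ eenymeenyOrder r fuel dq [] := by
  intro fuel
  induction fuel with
  | zero => intro dq acc; simp [eenymeenyOrder]
  | succ n ih =>
    intro dq acc
    simp only [eenymeenyOrder]
    by_cases h : dq.length = 0
    · simp [h]
    · simp only [h, if_false]
      cases hg : PySem.List.pyGet? dq (PySem.Int.mod (r - 1) (dq.length : Int)) with
      | none => simp
      | some x =>
        dsimp only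
        rw [ih, ih _ ([] ++ [x])]
        simp

-- removing the front-counted element from a rotated list re-rotates the erased list:
-- for p < len, s < len, q = (p+s) % len:
--   drop (s+1) (rotate p l) ++ take s (rotate p l) = rotate q (eraseIdx q l)
lemma rot_erase_core {α : Type} (l : List α) (p s : Nat) (hp : p < l.length) (hs : s < l.length) :
    (l.rotate p).drop (s + 1) ++ (l.rotate p).take s
      = (l.eraseIdx ((p + s) % l.length)).rotate ((p + s) % l.length) := by
  set m := l.length with hm
  have hrot : l.rotate p = l.drop p ++ l.take p := List.rotate_eq_drop_append_take hp.le
  by_cases hcase : p + s < m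
  · have hq : (p + s) % m = p + s := Nat.mod_eq_of_lt hcase
    have hre : l.eraseIdx (p + s) = l.take (p + s) ++ l.drop (p + s + 1) :=
      List.eraseIdx_eq_take_drop_succ l (p + s)
    have htlen : (l.take (p + s)).length = p + s := by
      simp only [List.length_take]; omega
    have hrot2 : (l.eraseIdx (p + s)).rotate (p + s)
        = (l.eraseIdx (p + s)).drop (p + s) ++ (l.eraseIdx (p + s)).take (p + s) := by
      refine List.rotate_eq_drop_append_take ?_
      rw [List.length_eraseIdx_of_lt (by omega)]; omega
    have hRHS : (l.eraseIdx (p + s)).rotate (p + s) = l.drop (p + s + 1) ++ l.take (p + s) := by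
      rw [hrot2, hre, List.drop_append, List.take_append, htlen, Nat.sub_self]
      rw [List.drop_eq_nil_of_le (le_of_eq htlen), List.take_of_length_le (le_of_eq htlen)]
      simp
    have hdl : (l.drop p).length = m - p := by simp only [List.length_drop, hm]
    have h1 : (l.drop p ++ l.take p).drop (s + 1)
        = l.drop (p + (s + 1)) ++ (l.take p).drop (s + 1 - (m - p)) := by
      rw [List.drop_append, List.drop_drop, hdl]
    have h2 : (l.drop p ++ l.take p).take s = (l.drop p).take s ++ (l.take p).take (s - (m - p)) := by
      rw [List.take_append, hdl]
    rw [hq, hrot, h1, h2, hRHS]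
    have hz1 : s + 1 - (m - p) = 0 := by omega
    have hz2 : s - (m - p) = 0 := by omega
    rw [hz1, hz2]
    simp only [List.drop_zero, List.take_zero, List.append_nil]
    rw [List.append_assoc, ← List.take_add]
    have : p + (s + 1) = p + s + 1 := by omega
    rw [this]
  · have hmp : m ≤ p + s := by omega
    have hq : (p + s) % m = p + s - m := by
      rw [Nat.mod_eq_sub_mod hmp, Nat.mod_eq_of_lt (by omega)]
    set q := p + s - m with hqdef
    have hq' : q < p := by omega
    rw [hq, hrot]
    have hdl : (l.drop p).length = m - p := by simp only [List.length_drop, hm]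
    have h1 : (l.drop p ++ l.take p).drop (s + 1)
        = l.drop (p + (s + 1)) ++ (l.take p).drop (s + 1 - (m - p)) := by
      rw [List.drop_append, List.drop_drop, hdl]
    have h2 : (l.drop p ++ l.take p).take s = (l.drop p).take s ++ (l.take p).take (s - (m - p)) := by
      rw [List.take_append, hdl]
    rw [h1, h2]
    have hd0 : l.drop (p + (s + 1)) = [] := List.drop_eq_nil_of_le (by omega)
    have ht0 : (l.drop p).take s = l.drop p := List.take_of_length_le (by omega)
    have he1 : s + 1 - (m - p) = q + 1 := by omega
    have he2 : s - (m - p) = q := by omega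
    rw [hd0, ht0, he1, he2, List.nil_append]
    -- RHS
    have hre : l.eraseIdx q = l.take q ++ l.drop (q + 1) := List.eraseIdx_eq_take_drop_succ l q
    have hrot2 : (l.eraseIdx q).rotate q
        = (l.eraseIdx q).drop q ++ (l.eraseIdx q).take q := by
      refine List.rotate_eq_drop_append_take ?_
      rw [List.length_eraseIdx_of_lt (by omega)]; omega
    have htq : (l.take q).length = q := by simp only [List.length_take]; omega
    rw [hrot2, hre, List.drop_append, List.take_append, htq, Nat.sub_self]
    simp only [List.drop_zero, List.take_zero, List.append_nil]
    rw [List.drop_eq_nil_of_le (le_of_eq htq), List.nil_append,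
      List.take_of_length_le (le_of_eq htq)]
    -- goal: (l.take p).drop (q+1) ++ (l.drop p ++ (l.take p).take q) = l.drop (q+1) ++ l.take q
    have hsplit : l.drop (q + 1) = (l.take p).drop (q + 1) ++ l.drop p := by
      conv_lhs => rw [← List.take_append_drop p l]
      rw [List.drop_append]
      have hzz : q + 1 - (l.take p).length = 0 := by
        simp only [List.length_take]; omega
      rw [hzz, List.drop_zero]
    have htkq : l.take q = (l.take p).take q := by
      rw [List.take_take, min_eq_left (by omega)]
    rw [hsplit, htkq, List.append_assoc]

-- general-p version (rotate reduces p modulo the length)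
lemma rot_erase {α : Type} (l : List α) (p s : Nat) (hs : s < l.length) :
    (l.rotate p).drop (s + 1) ++ (l.rotate p).take s
      = (l.eraseIdx ((p + s) % l.length)).rotate ((p + s) % l.length) := by
  have hm : 0 < l.length := by omega
  have h1 : l.rotate p = l.rotate (p % l.length) := (List.rotate_mod l p).symm
  have h2 : (p + s) % l.length = (p % l.length + s) % l.length := by
    conv_lhs => rw [← Nat.mod_add_mod]
  rw [h1, h2]
  exact rot_erase_core l (p % l.length) s (Nat.mod_lt _ hm) hs

lemma rot_get {α : Type} (l : List α) (p s : Nat) (hs : s < l.length) :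
    (l.rotate p)[s]'(by simpa using hs) = l[(p + s) % l.length]'(Nat.mod_lt _ (by omega)) := by
  rw [List.getElem_rotate]
  have h : (s + p) % l.length = (p + s) % l.length := by rw [Nat.add_comm]
  simp only [h]

-- the main loop invariant: A's state (list l, pointer p) corresponds to B's rotated list
lemma go_eq (r : Int) : ∀ (fuel : Nat) (l : List Int) (p : Nat) (team : Int) (t0 t1 : List Int),
    l.length = fuel → (team = 0 ∨ team = 1) →
    eenymeenyGo r fuel l (p : Int) team t0 t1
      = eenymeenySplit (eenymeenyOrder r fuel (l.rotate p) []) (team == 1) t0 t1 := by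
  intro fuel
  induction fuel with
  | zero =>
    intro l p team t0 t1 hlen _
    have : l = [] := List.eq_nil_of_length_eq_zero hlen
    subst this
    simp [eenymeenyGo, eenymeenyOrder, eenymeenySplit]
  | succ n ih =>
    intro l p team t0 t1 hlen hteam
    have hmpos : 0 < l.length := by omega
    have hmposI : (0 : Int) < (l.length : Int) := by exact_mod_cast hmpos
    -- A's new pointer
    set pI := PySem.Int.mod (-1 + (p : Int) + r) (l.length : Int) with hpI
    have hpI0 : 0 ≤ pI := PySem.Int.mod_nonneg _ hmposI
    have hpIlt : pI < (l.length : Int) := PySem.Int.mod_lt _ hmposI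
    set q := pI.toNat with hqdef
    have hqI : (q : Int) = pI := Int.toNat_of_nonneg hpI0
    have hqlt : q < l.length := by omega
    -- B's count index
    set sI := PySem.Int.mod (r - 1) ((l.rotate p).length : Int) with hsI
    have hrlen : (l.rotate p).length = l.length := List.length_rotate ..
    have hsI0 : 0 ≤ sI := PySem.Int.mod_nonneg _ (by rw [hrlen]; exact hmposI)
    have hsIlt : sI < (l.length : Int) := by
      rw [hsI, hrlen]
      exact PySem.Int.mod_lt _ hmposI
    set s := sI.toNat with hsdef
    have hsIq : (s : Int) = sI := Int.toNat_of_nonneg hsI0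
    have hslt : s < l.length := by omega
    -- q = (p + s) % len
    have hq_eq : q = (p + s) % l.length := by
      have e1 : (q : Int) = (-1 + (p : Int) + r) % (l.length : Int) := by
        rw [hqI, hpI]; exact PySem.Int.mod_eq_emod_of_pos hmposI
      have e2 : (s : Int) = (r - 1) % (l.length : Int) := by
        rw [hsIq, hsI, hrlen]; exact PySem.Int.mod_eq_emod_of_pos hmposI
      have e3 : (((p + s) % l.length : Nat) : Int) = ((p : Int) + (s : Int)) % (l.length : Int) := by
        push_cast; rfl
      have e4 : ((p : Int) + (s : Int)) % (l.length : Int) = (-1 + (p : Int) + r) % (l.length : Int) := by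
        rw [e2, Int.add_emod, Int.emod_emod_of_dvd _ dvd_rfl, ← Int.add_emod]
        congr 1; ring
      have : (((p + s) % l.length : Nat) : Int) = (q : Int) := by rw [e3, e4, e1]
      exact_mod_cast this.symm
    -- unfold one A step
    rw [show (n + 1) = n + 1 from rfl]
    simp only [eenymeenyGo]
    rw [if_neg (by omega)]
    have hpop : PySem.List.pop? l pI = some (l[q]'hqlt, l.eraseIdx q) := by
      rw [← hqI]; exact PySem.List.pop?_natCast l q hqlt
    rw [hpop]
    -- unfold one B step
    conv_rhs => rw [eenymeenyOrder]
    rw [if_neg (by rw [hrlen]; omega)]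
    have hget : PySem.List.pyGet? (l.rotate p) sI = some ((l.rotate p)[s]'(by rw [hrlen]; omega)) := by
      rw [← hsIq]
      rw [PySem.List.pyGet?_natCast]
      exact List.getElem?_eq_getElem (by rw [hrlen]; omega)
    rw [← hsI, hget]
    have hx : (l.rotate p)[s]'(by rw [hrlen]; omega) = l[q]'hqlt := by
      rw [rot_get l p s hslt]
      simp only [hq_eq]
    have hslice1 : PySem.List.slice (l.rotate p) (some (sI + 1)) none = (l.rotate p).drop (s + 1) := by
      rw [PySem.List.slice_from _ (by omega)]
      congr 1
      omega
    have hslice2 : PySem.List.slice (l.rotate p) none (some sI) = (l.rotate p).take s := by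
      rw [PySem.List.slice_to _ hsI0]
    have hnewdq : PySem.List.slice (l.rotate p) (some (sI + 1)) none ++
        PySem.List.slice (l.rotate p) none (some sI) = (l.eraseIdx q).rotate q := by
      rw [hslice1, hslice2, rot_erase l p s hslt, ← hq_eq]
    rw [hnewdq]
    dsimp only
    rw [eenymeenyOrder_acc, List.nil_append, hx]
    have hlen' : (l.eraseIdx q).length = n := by
      rw [List.length_eraseIdx_of_lt hqlt]; omega
    rcases hteam with h0 | h1
    · subst h0
      rw [if_pos rfl]
      have hmod : PySem.Int.mod ((0 : Int) + 1) 2 = 1 := by decide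
      rw [hmod, ← hpI, ← hqI, ih (l.eraseIdx q) q 1 (t0 ++ [l[q]'hqlt]) t1 hlen' (Or.inr rfl)]
      simp [eenymeenySplit]
    · subst h1
      rw [if_neg (by decide)]
      have hmod : PySem.Int.mod ((1 : Int) + 1) 2 = 0 := by decide
      rw [hmod, ← hpI, ← hqI, ih (l.eraseIdx q) q 0 t0 (t1 ++ [l[q]'hqlt]) hlen' (Or.inl rfl)]
      simp [eenymeenySplit]

-- ===== VERDICT (by name: the statement is the Claim_ definition above) =====
theorem eenymeeny_spec : Claim_equal_eenymeeny := by
  intro r kids _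
  unfold Spec_eenymeeny eenymeeny eenymeeny_alt
  have h := go_eq r kids.length kids 0 0 [] [] rfl (Or.inl rfl)
  simpa [List.rotate_zero] using h
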